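-- pv_equiv track=rewrite | github.com/zeronet-conservancy/zeronet-conservancy | greet.py | grad
-- ===== SOURCE A (Python) =====
-- def grad(n):
--     s = 0x08
--     r = 0xff
--     g = 0x00
--     b = 0x00
--     for i in range(n):
--         if r >= s and b < s:
--             r -= s
--             g += s
--         elif g >= s and r < s:
--             g -= s
--             b += s
--         elif b >= s and g < s:
--             b -= s
--             r += s
--     return f'#{r:02x}{g:02x}{b:02x}'
-- ===== SOURCE B (Python) =====
-- def grad(n):
--     # closed form: the color-wheel walk has period 93 (3 phases of 31 steps)
--     m = max(n, 0) % 93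
--     if m < 31:
--         r, g, b = 255 - 8 * m, 8 * m, 0
--     elif m < 62:
--         k = m - 31
--         r, g, b = 7, 248 - 8 * k, 8 * k
--     else:
--         k = m - 62
--         r, g, b = 7 + 8 * k, 0, 248 - 8 * k
--     return f'#{r:02x}{g:02x}{b:02x}'
-- ===== Notes on version B (the rewrite author's own statement) =====
-- stated objective: faster
-- what changed: Replaces the n-step simulation of the RGB gradient walk by an O(1) closed form: the walk is periodic with period 93 (three 31-step phases), so B computes max(n,0) % 93 and reads the color directly from phase arithmetic.
import Mathlib
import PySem

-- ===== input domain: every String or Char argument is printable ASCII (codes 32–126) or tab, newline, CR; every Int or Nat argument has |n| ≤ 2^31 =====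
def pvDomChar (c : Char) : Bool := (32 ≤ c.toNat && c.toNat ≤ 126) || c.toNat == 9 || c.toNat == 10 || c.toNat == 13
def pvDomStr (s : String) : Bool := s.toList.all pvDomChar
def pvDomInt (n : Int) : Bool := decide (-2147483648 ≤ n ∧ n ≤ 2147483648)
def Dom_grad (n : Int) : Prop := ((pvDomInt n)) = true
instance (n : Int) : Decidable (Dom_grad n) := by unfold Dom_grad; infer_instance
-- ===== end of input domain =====

-- B replaces A's n-step loop by a closed form using the walk's period 93 (O(1) vs O(n)).

-- ===== PORT A =====
-- f'{v:02x}' for 0 ≤ v ≤ 255 (the only values either program formats): exact there.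
def hexDigit (k : Nat) : Char := if k < 10 then Char.ofNat (48 + k) else Char.ofNat (87 + k)
def hex2 (v : Int) : String := String.ofList [hexDigit (v.toNat / 16 % 16), hexDigit (v.toNat % 16)]

-- the body of A's for-loop (one step of the gradient walk)
def gradStep (st : Int × Int × Int) : Int × Int × Int :=
  let (r, g, b) := st
  if r ≥ 8 ∧ b < 8 then (r - 8, g + 8, b)
  else if g ≥ 8 ∧ r < 8 then (r, g - 8, b + 8)
  else if b ≥ 8 ∧ g < 8 then (r + 8, g, b - 8)
  else (r, g, b)

def grad (n : Int) : String :=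
  let st := (PySem.List.pyRange 0 n 1).foldl (fun st _ => gradStep st) ((255 : Int), (0 : Int), (0 : Int))
  "#" ++ hex2 st.1 ++ hex2 st.2.1 ++ hex2 st.2.2

-- ===== PORT B =====
def gradAltState (m : Int) : Int × Int × Int :=
  if m < 31 then (255 - 8 * m, 8 * m, 0)
  else if m < 62 then (7, 248 - 8 * (m - 31), 8 * (m - 31))
  else (7 + 8 * (m - 62), 0, 248 - 8 * (m - 62))

def grad_alt (n : Int) : String :=
  let m := PySem.Int.mod (max n 0) 93
  let st := gradAltState m
  "#" ++ hex2 st.1 ++ hex2 st.2.1 ++ hex2 st.2.2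

-- ===== PRECONDITION & SPEC =====
def Spec_grad (n : Int) (out : String) : Prop := out = grad_alt n
instance (n : Int) (out : String) : Decidable (Spec_grad n out) := by unfold Spec_grad; infer_instance

-- ===== CLAIM (what is proved, stated in full; the proofs are below) =====
def Claim_equal_grad : Prop := ∀ (n : Int), Dom_grad n → Spec_grad n (grad n)

-- ===== LEMMAS AND PROOFS =====

theorem foldl_step_iterate (l : List Int) (st : Int × Int × Int) :
    l.foldl (fun st _ => gradStep st) st = gradStep^[l.length] st := by
  induction l generalizing st with
  | nil => rfl
  | cons x t ih => simp [List.foldl_cons, ih, Function.iterate_succ_apply]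

theorem iterate_period : gradStep^[93] ((255 : Int), (0 : Int), (0 : Int)) = (255, 0, 0) := by
  decide

theorem base_table : ∀ k : Nat, k < 93 →
    gradStep^[k] ((255 : Int), (0 : Int), (0 : Int)) = gradAltState (k : Int) := by
  decide

theorem iterate_mod (k : Nat) :
    gradStep^[k] ((255 : Int), (0 : Int), (0 : Int)) = gradAltState ((k % 93 : Nat) : Int) := by
  induction k using Nat.strong_induction_on with
  | _ k ih =>
    by_cases h : k < 93
    · rw [Nat.mod_eq_of_lt h]; exact base_table k h
    · have hk : k = (k - 93) + 93 := by omega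
      rw [hk, Function.iterate_add_apply, iterate_period, ih (k - 93) (by omega)]
      congr 1
      omega

theorem mod_eq (n : Int) : ((n.toNat % 93 : Nat) : Int) = PySem.Int.mod (max n 0) 93 := by
  simp only [PySem.Int.mod]
  rw [Int.fmod_eq_emod]
  simp

-- ===== VERDICT (by name: the statement is the Claim_ definition above) =====
theorem grad_spec : Claim_equal_grad := by
  intro n _
  unfold Spec_grad grad grad_alt
  rw [PySem.List.pyRange_one, foldl_step_iterate]
  simp only [List.length_map, List.length_range]
  rw [iterate_mod, show (n - 0).toNat = n.toNat by omega, mod_eq]
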